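-- pv_equiv track=rewrite | github.com/agilenature/orchestrator-policy-extraction | src/pipeline/validation/layers.py | _scopes_overlap
-- ===== SOURCE A (Python) =====
-- def _scopes_overlap(
--     episode_paths: list[str], constraint_paths: list[str]
-- ) -> bool:
--     """Check if episode paths overlap with constraint paths.
--
--     A constraint with empty paths is repo-wide and applies to everything.
--     Otherwise, checks if any episode path starts with or is a prefix of
--     any constraint path (or vice versa).
--     """
--     # Repo-wide constraint (empty paths) applies to all episodes
--     if not constraint_paths:
--         return True
--
--     for ep in episode_paths:
--         for cp in constraint_paths:
--             # Check prefix-based overlap in both directions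
--             if ep.startswith(cp) or cp.startswith(ep):
--                 return True
--
--     return False
-- ===== SOURCE B (Python) =====
-- def _scopes_overlap(
--     episode_paths: list[str], constraint_paths: list[str]
-- ) -> bool:
--     """Hash-set re-implementation: index every prefix of every episode path
--     once, then answer each constraint path by set membership instead of
--     scanning all episode paths per constraint path."""
--     if not constraint_paths:
--         return True
--
--     ep_set = set(episode_paths)
--     prefix_set = set()
--     for ep in episode_paths:
--         for i in range(len(ep) + 1):
--             prefix_set.add(ep[:i])
--
--     for cp in constraint_paths:
--         # some episode path starts with cp  <=>  cp is a prefix of some ep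
--         if cp in prefix_set:
--             return True
--         # cp starts with some episode path  <=>  some prefix of cp is an ep
--         for i in range(len(cp) + 1):
--             if cp[:i] in ep_set:
--                 return True
--
--     return False
-- ===== Notes on version B (the rewrite author's own statement) =====
-- stated objective: alternative
-- what changed: Replaced A's all-pairs nested startswith scan by building a set of every prefix of every episode path once, then answering each constraint path by set-membership lookups over its prefixes, removing the inner scan over episode paths.
import Mathlib
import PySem

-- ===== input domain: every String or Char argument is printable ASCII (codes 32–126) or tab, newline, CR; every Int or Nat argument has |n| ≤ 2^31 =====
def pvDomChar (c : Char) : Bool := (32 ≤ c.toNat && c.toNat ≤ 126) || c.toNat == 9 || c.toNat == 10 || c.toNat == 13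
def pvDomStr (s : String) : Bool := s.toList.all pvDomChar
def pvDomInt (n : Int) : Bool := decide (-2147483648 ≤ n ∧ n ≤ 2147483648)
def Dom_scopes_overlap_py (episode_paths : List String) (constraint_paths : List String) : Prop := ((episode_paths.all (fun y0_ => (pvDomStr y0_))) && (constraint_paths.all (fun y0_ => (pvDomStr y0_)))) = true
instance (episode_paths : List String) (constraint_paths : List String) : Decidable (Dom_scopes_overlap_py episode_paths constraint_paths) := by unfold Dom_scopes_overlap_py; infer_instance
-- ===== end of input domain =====

-- B replaces A's all-pairs startswith scan by a set of every prefix of every episode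
-- path, answering each constraint path by set membership over its prefixes (objective:
-- alternative algorithm; not measured faster).

-- ===== PORT A =====
def scopes_overlap_py (episode_paths : List String) (constraint_paths : List String) : Bool :=
  if constraint_paths.isEmpty then true
  else
    episode_paths.any (fun ep =>
      constraint_paths.any (fun cp =>
        PySem.Str.startswith ep cp || PySem.Str.startswith cp ep))

-- ===== PORT B =====
def scopes_overlap_py_alt (episode_paths : List String) (constraint_paths : List String) : Bool :=
  if constraint_paths.isEmpty then true
  else
    let epSet : PySem.Set String := PySem.Set.ofList episode_paths
    let prefixSet : PySem.Set String :=
      episode_paths.foldl (fun s ep =>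
        (PySem.List.pyRange 0 (PySem.Str.len ep + 1) 1).foldl
          (fun s i => PySem.Set.add s (PySem.Str.slice ep none (some i))) s)
        PySem.Set.empty
    constraint_paths.any (fun cp =>
      PySem.Set.contains prefixSet cp ||
      (PySem.List.pyRange 0 (PySem.Str.len cp + 1) 1).any
        (fun i => PySem.Set.contains epSet (PySem.Str.slice cp none (some i))))

-- ===== PRECONDITION & SPEC =====
def Spec_scopes_overlap_py (episode_paths : List String) (constraint_paths : List String) (out : Bool) : Prop := out = scopes_overlap_py_alt episode_paths constraint_paths
instance (episode_paths : List String) (constraint_paths : List String) (out : Bool) : Decidable (Spec_scopes_overlap_py episode_paths constraint_paths out) := by unfold Spec_scopes_overlap_py; infer_instance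

-- ===== CLAIM (what is proved, stated in full; the proofs are below) =====
def Claim_equal_scopes_overlap_py : Prop := ∀ (episode_paths : List String) (constraint_paths : List String), Dom_scopes_overlap_py episode_paths constraint_paths → Spec_scopes_overlap_py episode_paths constraint_paths (scopes_overlap_py episode_paths constraint_paths)

-- ===== LEMMAS AND PROOFS =====

-- the takes s[:i], i = 0..len s, are exactly the prefixes of s
theorem slice_take_iff (s x : String) :
    (∃ i ∈ PySem.List.pyRange 0 (PySem.Str.len s + 1) 1,
        x = PySem.Str.slice s none (some i)) ↔ x.toList <+: s.toList := by
  constructor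
  · rintro ⟨i, hi, rfl⟩
    rw [PySem.List.mem_pyRange_one] at hi
    have hx : (PySem.Str.slice s none (some i)).toList = List.take i.toNat s.toList := by
      rw [PySem.Str.toList_slice]; exact PySem.List.slice_to _ hi.1
    rw [hx]
    exact List.take_prefix _ _
  · intro h
    refine ⟨(x.toList.length : Int), ?_, ?_⟩
    · rw [PySem.List.mem_pyRange_one]
      have h1 := h.length_le
      have h2 : PySem.Str.len s = (s.toList.length : Int) := by
        simp [PySem.Str.len_eq]
      rw [h2]
      omega
    · apply String.toList_inj.mp
      rw [PySem.Str.toList_slice]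
      rw [show PySem.Chars.slice s.toList none (some (x.toList.length : Int)) =
            List.take ((x.toList.length : Int)).toNat s.toList from
          PySem.List.slice_to _ (by positivity)]
      simpa using List.prefix_iff_eq_take.mp h

-- membership in a foldl of Set.add over the values g a
theorem mem_foldl_add_fn {α β : Type} [BEq β] [LawfulBEq β]
    (l : List α) (g : α → β) (s : PySem.Set β) (x : β) :
    x ∈ l.foldl (fun s a => PySem.Set.add s (g a)) s ↔ x ∈ s ∨ ∃ a ∈ l, x = g a := by
  induction l generalizing s with
  | nil => simp
  | cons a l ih =>
    simp only [List.foldl_cons, ih, PySem.Set.mem_add, List.mem_cons]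
    aesop

-- membership in B's prefix set: exactly the prefixes of the episode paths
theorem mem_prefixSet (E : List String) (s : PySem.Set String) (x : String) :
    x ∈ E.foldl (fun s ep =>
        (PySem.List.pyRange 0 (PySem.Str.len ep + 1) 1).foldl
          (fun s i => PySem.Set.add s (PySem.Str.slice ep none (some i))) s) s
      ↔ x ∈ s ∨ ∃ ep ∈ E, x.toList <+: ep.toList := by
  induction E generalizing s with
  | nil => simp
  | cons ep E ih =>
    simp only [List.foldl_cons, ih, mem_foldl_add_fn, List.mem_cons]
    rw [slice_take_iff ep x]
    aesop

-- B's inner loop over cp's takes hits the episode set iff some episode path is a prefix of cp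
theorem exists_slice_mem_iff (cp : String) (E : List String) :
    (∃ i ∈ PySem.List.pyRange 0 (PySem.Str.len cp + 1) 1,
        PySem.Str.slice cp none (some i) ∈ E) ↔ ∃ ep ∈ E, ep.toList <+: cp.toList := by
  constructor
  · rintro ⟨i, hi, hmem⟩
    exact ⟨_, hmem, (slice_take_iff cp _).mp ⟨i, hi, rfl⟩⟩
  · rintro ⟨ep, hep, hpre⟩
    obtain ⟨i, hi, hxeq⟩ := (slice_take_iff cp ep).mpr hpre
    exact ⟨i, hi, hxeq ▸ hep⟩

-- ===== VERDICT (by name: the statement is the Claim_ definition above) =====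
theorem scopes_overlap_py_spec : Claim_equal_scopes_overlap_py := by
  intro E C _
  show scopes_overlap_py E C = scopes_overlap_py_alt E C
  unfold scopes_overlap_py scopes_overlap_py_alt
  by_cases hC : C.isEmpty
  · simp [hC]
  · simp only [hC, if_neg, Bool.false_eq_true, not_false_eq_true]
    rw [Bool.eq_iff_iff]
    simp only [List.any_eq_true, Bool.or_eq_true, PySem.Set.contains_iff,
      PySem.Set.mem_ofList, mem_prefixSet, exists_slice_mem_iff,
      PySem.Str.startswith_eq, PySem.Chars.startswith_iff]
    simp only [PySem.Set.empty, List.not_mem_nil, false_or]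
    constructor
    · rintro ⟨ep, hep, cp, hcp, h | h⟩
      · exact ⟨cp, hcp, Or.inl ⟨ep, hep, h⟩⟩
      · exact ⟨cp, hcp, Or.inr ⟨ep, hep, h⟩⟩
    · rintro ⟨cp, hcp, ⟨ep, hep, h⟩ | ⟨ep, hep, h⟩⟩
      · exact ⟨ep, hep, cp, hcp, Or.inl h⟩
      · exact ⟨ep, hep, cp, hcp, Or.inr h⟩
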